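-- pv_equiv track=rewrite | github.com/posl/comment_recommendation | script/split_gen/4_time/zh/234_C/6.py | getKthNumber
-- ===== SOURCE A (Python) =====
-- def getKthNumber(k):
--     if k == 1:
--         return 2
--     elif k == 2:
--         return 20
--     elif k == 3:
--         return 22
--     else:
--         return 20 * (10**(k-3)) + getKthNumber(k-2)
-- ===== SOURCE B (Python) =====
-- def getKthNumber(k):
--     if k == 1:
--         return 2
--     if k == 2:
--         return 20
--     val, start = (2, 3) if k % 2 == 1 else (20, 4)
--     for i in range(start, k + 1, 2):
--         val = 20 * 10 ** (i - 3) + val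
--     return val
-- ===== Notes on version B (the rewrite author's own statement) =====
-- stated objective: alternative
-- what changed: Replaced A's top-down recursion with a bottom-up iterative accumulation: B picks the parity-dependent base value and then folds the recurrence forward over a step-2 range, maintaining the accumulated number instead of recursing.
import Mathlib
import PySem

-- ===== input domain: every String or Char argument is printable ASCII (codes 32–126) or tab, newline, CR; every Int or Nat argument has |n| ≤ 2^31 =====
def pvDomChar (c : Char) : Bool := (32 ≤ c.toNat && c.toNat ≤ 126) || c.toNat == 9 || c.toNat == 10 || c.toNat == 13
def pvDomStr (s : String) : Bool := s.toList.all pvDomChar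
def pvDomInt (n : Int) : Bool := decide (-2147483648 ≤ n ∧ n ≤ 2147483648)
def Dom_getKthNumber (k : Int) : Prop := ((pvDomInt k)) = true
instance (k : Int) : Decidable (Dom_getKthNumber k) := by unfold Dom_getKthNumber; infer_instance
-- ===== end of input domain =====

-- B replaces A's top-down recursion with a bottom-up loop over a step-2 range (alternative decomposition).

-- ===== PORT A =====
-- A recurses k → k-2 down to the base cases 1/2/3; for k ≤ 0 Python never terminates
-- (excluded by Pre_), so the final 'else 0' branch is a totality guard only, never
-- reached on Pre_. 10**(k-3) has k-3 ≥ 1 in the recursive branch, so (k-3).toNat is exact.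
def getKthNumber (k : Int) : Int :=
  if k = 1 then 2
  else if k = 2 then 20
  else if k = 3 then 22
  else if h : 4 ≤ k then 20 * 10 ^ (k - 3).toNat + getKthNumber (k - 2)
  else 0
termination_by k.toNat
decreasing_by omega

-- ===== PORT B =====
-- Loop 'for i in range(start, k+1, 2): val = 20*10**(i-3) + val' as a foldl over
-- PySem.List.pyRange; i - 3 ≥ 0 along the range, so the Nat exponent is exact.
def getKthNumber_alt (k : Int) : Int :=
  if k = 1 then 2
  else if k = 2 then 20
  else
    let val : Int := if k % 2 = 1 then 2 else 20
    let start : Int := if k % 2 = 1 then 3 else 4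
    (PySem.List.pyRange start (k + 1) 2).foldl (fun v i => 20 * 10 ^ (i - 3).toNat + v) val

-- ===== PRECONDITION & SPEC =====
-- Pre_ excludes k ≤ 0, on which the Python A recurses forever (RecursionError).
def Pre_getKthNumber (k : Int) : Prop := 1 ≤ k
instance (k : Int) : Decidable (Pre_getKthNumber k) := by unfold Pre_getKthNumber; infer_instance
def pvWitness_getKthNumber : Int := 5

def Spec_getKthNumber (k : Int) (out : Int) : Prop := out = getKthNumber_alt k
instance (k : Int) (out : Int) : Decidable (Spec_getKthNumber k out) := by unfold Spec_getKthNumber; infer_instance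

-- ===== CLAIM (what is proved, stated in full; the proofs are below) =====
def Claim_equal_getKthNumber : Prop := ∀ (k : Int), Dom_getKthNumber k → Pre_getKthNumber k → Spec_getKthNumber k (getKthNumber k)

-- ===== LEMMAS AND PROOFS =====

-- Splitting the last element off a step-2 range.
theorem pyRange_two_snoc (a k : Int) (hak : a ≤ k) (hd : 2 ∣ k - a) :
    PySem.List.pyRange a (k + 1) 2 = PySem.List.pyRange a (k - 1) 2 ++ [k] := by
  obtain ⟨m, hm⟩ := hd
  have hm0 : 0 ≤ m := by omega
  rw [PySem.List.pyRange_of_pos a (k + 1) (by norm_num),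
      PySem.List.pyRange_of_pos a (k - 1) (by norm_num)]
  have h1 : ((k + 1 - a + 2 - 1) / 2).toNat = m.toNat + 1 := by
    have : k + 1 - a + 2 - 1 = 2 * (m + 1) := by omega
    rw [this, Int.mul_ediv_cancel_left _ (by norm_num)]; omega
  have h2 : (if a < k - 1 then ((k - 1 - a + 2 - 1) / 2).toNat else 0) = m.toNat := by
    by_cases hlt : a < k - 1
    · simp only [if_pos hlt]
      have : k - 1 - a + 2 - 1 = 2 * m := by omega
      rw [this, Int.mul_ediv_cancel_left _ (by norm_num)]
    · simp only [if_neg hlt]; omega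
  rw [if_pos (by omega), h1, h2, List.range_succ, List.map_append]
  simp only [List.map_cons, List.map_nil]
  congr 2
  omega

-- B's loop satisfies A's recurrence.
theorem alt_step (k : Int) (hk : 6 ≤ k) :
    getKthNumber_alt k = 20 * 10 ^ (k - 3).toNat + getKthNumber_alt (k - 2) := by
  have hmod : (k - 2) % 2 = k % 2 := by omega
  have h1 : ¬(k = 1) := by omega
  have h2 : ¬(k = 2) := by omega
  have h3 : ¬(k - 2 = 1) := by omega
  have h4 : ¬(k - 2 = 2) := by omega
  simp only [getKthNumber_alt, if_neg h1, if_neg h2, if_neg h3, if_neg h4, hmod]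
  by_cases hpar : k % 2 = 1
  · simp only [if_pos hpar]
    have hsplit := pyRange_two_snoc 3 k (by omega) (by omega)
    rw [show k - 2 + 1 = k - 1 by ring, hsplit, List.foldl_append]
    simp only [List.foldl_cons, List.foldl_nil]
  · simp only [if_neg hpar]
    have hsplit := pyRange_two_snoc 4 k (by omega) (by omega)
    rw [show k - 2 + 1 = k - 1 by ring, hsplit, List.foldl_append]
    simp only [List.foldl_cons, List.foldl_nil]

theorem main_eq : ∀ (n : Nat), getKthNumber ((n : Int) + 1) = getKthNumber_alt ((n : Int) + 1) := by
  intro n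
  induction n using Nat.strong_induction_on with
  | _ n ih =>
    match n with
    | 0 => rw [show ((0 : Nat) : Int) + 1 = 1 by norm_num, getKthNumber]; decide
    | 1 => rw [show ((1 : Nat) : Int) + 1 = 2 by norm_num, getKthNumber]; decide
    | 2 => rw [show ((2 : Nat) : Int) + 1 = 3 by norm_num, getKthNumber]; decide
    | 3 => rw [show ((3 : Nat) : Int) + 1 = 4 by norm_num, getKthNumber, getKthNumber]; decide
    | 4 => rw [show ((4 : Nat) : Int) + 1 = 5 by norm_num, getKthNumber, getKthNumber]; decide
    | (m + 5) =>
      have hc : ((m + 5 : Nat) : Int) + 1 = (m : Int) + 6 := by push_cast; ring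
      rw [hc]
      have hA : getKthNumber ((m : Int) + 6) =
          20 * 10 ^ (((m : Int) + 6) - 3).toNat + getKthNumber (((m : Int) + 6) - 2) := by
        rw [getKthNumber]
        rw [if_neg (by omega), if_neg (by omega), if_neg (by omega), dif_pos (by omega)]
      have hprev : ((m : Int) + 6) - 2 = ((m + 3 : Nat) : Int) + 1 := by push_cast; ring
      have hIH := ih (m + 3) (by omega)
      rw [hA, hprev, hIH, ← hprev, ← alt_step _ (by omega)]

-- ===== VERDICT (by name: the statement is the Claim_ definition above) =====
theorem getKthNumber_spec : Claim_equal_getKthNumber := by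
  intro k _ hpre
  unfold Spec_getKthNumber
  have hn : k = ((k - 1).toNat : Int) + 1 := by
    unfold Pre_getKthNumber at hpre; omega
  rw [hn]
  exact main_eq (k - 1).toNat
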